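-- pv_equiv track=rewrite | github.com/vapostolopoulos/FlowAwareNFV | experiments/intel_skylake_X/trex/trex_stats_collector.py | fix_hist_format
-- ===== SOURCE A (Python) =====
-- def fix_hist_format(hist):
--     """ Changes the format of histogram
--         Args:
--             hist (dict): a dictionary of histogram
--
--         Returns:
--             fixed_hist (dict): the dictionary of histogram with fixed format
--     """
--
--     list_dict = []
--     l = hist.keys()
--     l=sorted(l)
--     i = 0
--     range_end_previous = 0
--
--     for sample in l:
--         range_start = sample
--
--         if i != 0:
--             if range_start != range_end_previous:
--                 while range_start != range_end_previous:
--                     new_range_start = range_end_previous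
--                     if new_range_start == 0:
--                         range_end = 10
--                     else:
--                         range_end  = new_range_start + pow(10, (len(str(new_range_start))-1))
--
--                     val = 0
--                     print ("    Packets with latency between {0} and {1}:{2} ".format(new_range_start, range_end, val))
--                     list_dict.insert(len(list_dict), {"value":range_end,"count":val})
--                     range_end_previous = range_end
--
--
--         if range_start == 0:
--             range_end = 10
--         else:
--             range_end  = range_start + pow(10, (len(str(range_start))-1))
--
--         val = hist[sample]
--         print ("    Packets with latency between {0} and {1}:{2} ".format(range_start, range_end, val))
--
--         if val < 0:
--             val = 0
--         list_dict.insert(len(list_dict), {"value":range_end,"count":val})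
--         range_end_previous = range_end
--         i += 1
--
--     fixed_hist = {"histogram":list_dict}
--     return fixed_hist
-- ===== SOURCE B (Python) =====
-- def fix_hist_format(hist):
--     """Same reformatting as the original, done in one boundary-driven pass:
--     walk the bucket boundaries from the smallest key to the largest,
--     consulting the dict at each boundary instead of gap-filling per key."""
--     keys = sorted(hist)
--     if not keys:
--         return {"histogram": []}
--     cur, last = keys[0], keys[-1]
--     out = []
--     while True:
--         range_end = 10 if cur == 0 else cur + 10 ** (len(str(cur)) - 1)
--         val = hist.get(cur, 0)
--         print("    Packets with latency between {0} and {1}:{2} ".format(cur, range_end, val))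
--         out.append({"value": range_end, "count": max(val, 0)})
--         if cur == last:
--             break
--         cur = range_end
--     return {"histogram": out}
-- ===== Notes on version B (the rewrite author's own statement) =====
-- stated objective: simpler
-- what changed: Replaces the outer loop over sorted keys with a nested gap-filling while-loop by a single boundary-driven walk from the smallest to the largest key that consults the dict at each bucket boundary (0 for gaps), emitting prints and buckets in one pass.
import Mathlib
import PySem

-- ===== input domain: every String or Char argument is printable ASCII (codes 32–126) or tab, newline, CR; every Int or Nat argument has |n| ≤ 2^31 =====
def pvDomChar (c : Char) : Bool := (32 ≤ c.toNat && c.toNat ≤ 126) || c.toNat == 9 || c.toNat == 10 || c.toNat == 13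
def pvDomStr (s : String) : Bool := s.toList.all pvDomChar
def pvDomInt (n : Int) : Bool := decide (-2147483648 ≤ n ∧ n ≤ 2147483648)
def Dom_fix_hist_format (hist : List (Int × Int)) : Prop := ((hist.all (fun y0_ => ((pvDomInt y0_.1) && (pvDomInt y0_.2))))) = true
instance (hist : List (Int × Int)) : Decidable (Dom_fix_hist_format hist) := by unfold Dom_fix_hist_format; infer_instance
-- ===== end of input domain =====

-- B replaces A's loop over sorted keys with its nested gap-filling while-loop by one boundary-driven
-- pass from the smallest to the largest key (objective: simpler); A's prints are side effects only and
-- are ported as pure code (B's Python prints the identical lines); the RETURN value is what is proved equal.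

-- `10 if c == 0 else c + 10**(len(str(c))-1)`: the bucket boundary following `c` (shared helper)
def pvNextEnd (c : Int) : Int :=
  if c = 0 then 10 else c + (10 : Int) ^ ((PySem.Int.toChars c).length - 1)
def pvLowPart (n : Int) : Int := n % (10 : Int) ^ ((PySem.Int.toChars n).length - 1)
def pvPosStart (a : Int) : Int := if 1 ≤ a then a else pvNextEnd a


-- ===== PORT A =====
-- pvGapA is the inner `while range_start != range_end_previous` loop; the fuel (range_start - rep).toNat
-- only makes it total in Lean: each step strictly increases rep, and inside Pre_ the loop exits by
-- reaching the target exactly, as in Python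

def pvGapA (target : Int) : Nat → Int → List (List (String × Int)) → Int × List (List (String × Int))
  | fuel, rep, ld =>
    if target = rep then (rep, ld)
    else match fuel with
      | 0 => (rep, ld)
      | f + 1 =>
        let range_end := pvNextEnd rep
        pvGapA target f range_end (ld ++ [[("value", range_end), ("count", (0 : Int))]])

def pvLoopA (hist : List (Int × Int)) : List Int → List (List (String × Int)) → Int → Int → List (List (String × Int))
  | [], ld, _, _ => ld
  | sample :: rest, ld, i, rep =>
    let p : Int × List (List (String × Int)) :=
      if i ≠ 0 then
        if sample ≠ rep then pvGapA sample ((sample - rep).toNat) rep ld else (rep, ld)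
      else (rep, ld)
    let range_end := pvNextEnd sample
    let val := PySem.Dict.getD (PySem.Dict.mk hist) sample 0
    let val' := if val < 0 then 0 else val
    pvLoopA hist rest (p.2 ++ [[("value", range_end), ("count", val')]]) (i + 1) range_end


-- hist[sample] in the loop never raises (sample is a key of hist), so getD's default is unreachable
def fix_hist_format (hist : List (Int × Int)) : List (String × List (List (String × Int))) :=
  let l := PySem.List.sorted (PySem.Dict.keys (PySem.Dict.mk hist)) (fun x => x) false
  [("histogram", pvLoopA hist l [] 0 0)]


-- ===== PORT B =====
-- B's single while-loop: emit the bucket at cur, stop after the largest key, else advance to the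
-- next boundary; the fuel (last - cur).toNat + 1 only makes it total in Lean (cur strictly increases)
def pvLoopB (hist : List (Int × Int)) (last : Int) : Nat → Int → List (List (String × Int)) → List (List (String × Int))
  | 0, _, out => out
  | f + 1, cur, out =>
    let range_end := pvNextEnd cur
    let val := PySem.Dict.getD (PySem.Dict.mk hist) cur 0
    let out' := out ++ [[("value", range_end), ("count", max val 0)]]
    if cur = last then out' else pvLoopB hist last f range_end out'


def fix_hist_format_alt (hist : List (Int × Int)) : List (String × List (List (String × Int))) :=
  let keys := PySem.List.sorted (PySem.Dict.keys (PySem.Dict.mk hist)) (fun x => x) false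
  match keys with
  | [] => [("histogram", [])]
  | k :: rest =>
    let last := (k :: rest).getLast (by simp)
    [("histogram", pvLoopB hist last ((last - k).toNat + 1) k [])]


-- ===== PRECONDITION & SPEC =====
-- `pvReachB a b`: b lies on the boundary chain a, pvNextEnd a, pvNextEnd (pvNextEnd a), … — in closed
-- form: b equals a, or b is at least the first positive chain point and agrees with it below its
-- leading decimal digit
def pvReachB (a b : Int) : Bool :=
  (b == a) || (decide (pvPosStart a ≤ b) && (pvLowPart b == pvLowPart (pvPosStart a)))


-- Pre_ excludes (1) association lists with duplicate keys (those are not encodings of a Python dict,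
-- which this argument is) and (2) histograms whose consecutive sorted keys are not linked by the
-- bucket-boundary chain: on those A's gap-filling while-loop never terminates (A returns no value).
def Pre_fix_hist_format (hist : List (Int × Int)) : Prop :=
  (hist.map Prod.fst).Nodup ∧
  List.IsChain (fun k k' => pvReachB (pvNextEnd k) k' = true)
    (PySem.List.sorted (hist.map Prod.fst) (fun x => x) false)


instance (hist : List (Int × Int)) : Decidable (Pre_fix_hist_format hist) := by
  unfold Pre_fix_hist_format; infer_instance

def pvWitness_fix_hist_format : (List (Int × Int)) := [(0, 3), (20, 5)]

def Spec_fix_hist_format (hist : List (Int × Int)) (out : List (String × List (List (String × Int)))) : Prop := out = fix_hist_format_alt hist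
instance (hist : List (Int × Int)) (out : List (String × List (List (String × Int)))) : Decidable (Spec_fix_hist_format hist out) := by unfold Spec_fix_hist_format; infer_instance

-- ===== CLAIM (what is proved, stated in full; the proofs are below) =====
def Claim_equal_fix_hist_format : Prop := ∀ (hist : List (Int × Int)), Dom_fix_hist_format hist → Pre_fix_hist_format hist → Spec_fix_hist_format hist (fix_hist_format hist)

-- ===== LEMMAS AND PROOFS =====
theorem pv_core_len : ∀ (f n : Nat), n < f → (Nat.toDigitsCore 10 f n []).length = Nat.log 10 n + 1 := by
  intro f
  induction f with
  | zero => omega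
  | succ f ih =>
    intro n hn
    rw [Nat.toDigitsCore]
    by_cases h : n / 10 = 0
    · have hlt : n < 10 := (Nat.div_eq_zero_iff_lt (by norm_num)).1 h
      simp [h, Nat.log_eq_zero_iff.2 (Or.inl hlt)]
    · have h10 : 10 ≤ n := by
        by_contra hc; exact h (Nat.div_eq_of_lt (by omega))
      simp only [h, if_false]
      rw [Nat.toDigitsCore_lens_eq]
      rw [ih (n / 10) (by omega)]
      rw [Nat.log_div_base]
      have : 0 < Nat.log 10 n := Nat.log_pos (by omega) h10
      omega

theorem pv_len_pos (n : Int) (h : 1 ≤ n) :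
    (PySem.Int.toChars n).length = Nat.log 10 n.toNat + 1 := by
  rw [PySem.Int.toChars, if_neg (by omega), Nat.toDigits]
  exact pv_core_len _ _ (by omega)

theorem pv_len_neg (n : Int) (h : n ≤ -1) :
    (PySem.Int.toChars n).length = Nat.log 10 n.natAbs + 2 := by
  rw [PySem.Int.toChars, if_pos (by omega)]
  simp [Nat.toDigits, pv_core_len _ _ (Nat.lt_succ_self _)]

theorem pv_bounds_pos (n : Int) (h : 1 ≤ n) :
    (10 : Int) ^ ((PySem.Int.toChars n).length - 1) ≤ n ∧
    n < (10 : Int) ^ ((PySem.Int.toChars n).length) := by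
  rw [pv_len_pos n h]
  have h1 : (10 : Nat) ^ (Nat.log 10 n.toNat) ≤ n.toNat := Nat.pow_log_le_self 10 (by omega)
  have h2 : n.toNat < 10 ^ (Nat.log 10 n.toNat + 1) := Nat.lt_pow_succ_log_self (by omega) _
  have e1 : ((10:Nat) ^ (Nat.log 10 n.toNat) : Int) ≤ (n.toNat : Int) := by exact_mod_cast h1
  have e2 : (n.toNat : Int) < ((10:Nat) ^ (Nat.log 10 n.toNat + 1) : Int) := by exact_mod_cast h2
  have hn : (n.toNat : Int) = n := by omega
  rw [hn] at e1 e2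
  push_cast at e1 e2
  exact ⟨by simpa using e1, by simpa using e2⟩

theorem pv_nextEnd_gt (c : Int) : c < pvNextEnd c := by
  rw [pvNextEnd]
  split_ifs with h
  · omega
  · have : (0:Int) < 10 ^ ((PySem.Int.toChars c).length - 1) := by positivity
    omega

theorem pv_nextEnd_pos (a : Int) (h : a ≤ 0) : 1 ≤ pvNextEnd a := by
  rw [pvNextEnd]
  split_ifs with h0
  · omega
  · have hneg : a ≤ -1 := by omega
    rw [pv_len_neg a hneg]
    have h2 : a.natAbs < 10 ^ (Nat.log 10 a.natAbs + 1) := Nat.lt_pow_succ_log_self (by omega) _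
    have e2 : (a.natAbs : Int) < (10:Int) ^ (Nat.log 10 a.natAbs + 1) := by exact_mod_cast h2
    have hs : (Nat.log 10 a.natAbs + 2 - 1) = Nat.log 10 a.natAbs + 1 := by omega
    rw [hs]
    have : (a.natAbs : Int) = -a := by omega
    omega

theorem pv_len_unique (n : Int) (d : Nat) (hd : 1 ≤ d) (h1 : (10:Int) ^ (d-1) ≤ n) (h2 : n < (10:Int) ^ d) :
    (PySem.Int.toChars n).length = d := by
  have hp1 : (1:Int) ≤ 10 ^ (d-1) := one_le_pow₀ (by norm_num)
  have hn : 1 ≤ n := le_trans hp1 h1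
  have hn1 : (10:Nat) ^ (d-1) ≤ n.toNat := by
    have : (((10:Nat) ^ (d-1) : Nat) : Int) ≤ n := by push_cast; exact h1
    omega
  have hn2 : n.toNat < (10:Nat) ^ d := by
    have : n < (((10:Nat) ^ d : Nat) : Int) := by push_cast; exact h2
    omega
  rw [pv_len_pos n hn]
  have hdd : d - 1 + 1 = d := by omega
  have hlog : Nat.log 10 n.toNat = d - 1 :=
    Nat.log_eq_of_pow_le_of_lt_pow hn1 (hdd ▸ hn2)
  omega

theorem pv_low_nextEnd (n : Int) (h : 1 ≤ n) : pvLowPart (pvNextEnd n) = pvLowPart n := by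
  obtain ⟨d, hd⟩ : ∃ d, (PySem.Int.toChars n).length = d := ⟨_, rfl⟩
  obtain ⟨hb1, hb2⟩ := pv_bounds_pos n h
  rw [hd] at hb1 hb2
  have hd1 : 1 ≤ d := by rw [pv_len_pos n h] at hd; omega
  have hne : pvNextEnd n = n + 10 ^ (d - 1) := by rw [pvNextEnd, if_neg (by omega), hd]
  have hsd : (10:Int) ^ d = 10 * 10 ^ (d - 1) := by rw [← pow_succ']; congr 1; omega
  have hspos : (0:Int) < 10 ^ (d - 1) := by positivity
  rw [hne]
  by_cases hcase : n + 10 ^ (d - 1) < 10 ^ d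
  · have hlen : (PySem.Int.toChars (n + 10 ^ (d - 1))).length = d :=
      pv_len_unique _ d hd1 (by omega) hcase
    rw [pvLowPart, pvLowPart, hlen, hd]
    rw [show n + (10:Int) ^ (d-1) = n + 10 ^ (d-1) * 1 by ring, Int.add_mul_emod_self_left]
  · have hlen : (PySem.Int.toChars (n + 10 ^ (d - 1))).length = d + 1 := by
      apply pv_len_unique _ (d+1) (by omega)
      · have e : d + 1 - 1 = d := by omega
        rw [e]; omega
      · have e : (10:Int) ^ (d+1) = 10 * 10 ^ d := by rw [pow_succ']
        omega
    rw [pvLowPart, pvLowPart, hlen, hd]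
    have e1 : d + 1 - 1 = d := by omega
    rw [e1, hsd]
    have h9 : 9 * 10 ^ (d-1) ≤ n := by omega
    have hr1 : (0:Int) ≤ n - 9 * 10 ^ (d-1) := by omega
    have hr2 : n - 9 * 10 ^ (d-1) < 10 ^ (d-1) := by omega
    have lhs : (n + 10 ^ (d-1)) % (10 * 10 ^ (d-1)) = n - 9 * 10 ^ (d-1) := by
      rw [show n + (10:Int) ^ (d-1) = (n - 9 * 10 ^ (d-1)) + (10 * 10 ^ (d-1)) * 1 by ring,
        Int.add_mul_emod_self_left]
      exact Int.emod_eq_of_lt hr1 (by omega)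
    have rhs : n % 10 ^ (d-1) = n - 9 * 10 ^ (d-1) := by
      conv_lhs => rw [show n = (n - 9 * 10 ^ (d-1)) + 10 ^ (d-1) * 9 by ring]
      rw [Int.add_mul_emod_self_left]
      exact Int.emod_eq_of_lt hr1 hr2
    rw [lhs, rhs]

theorem pv_nextEnd_le (a b : Int) (ha : 1 ≤ a) (hab : a < b) (hlow : pvLowPart b = pvLowPart a) :
    pvNextEnd a ≤ b := by
  have hb : 1 ≤ b := by omega
  obtain ⟨da, hda⟩ : ∃ d, (PySem.Int.toChars a).length = d := ⟨_, rfl⟩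
  obtain ⟨db, hdb⟩ : ∃ d, (PySem.Int.toChars b).length = d := ⟨_, rfl⟩
  have hda1 : 1 ≤ da := by rw [pv_len_pos a ha] at hda; omega
  have hdb1 : 1 ≤ db := by rw [pv_len_pos b hb] at hdb; omega
  obtain ⟨ha1, ha2⟩ := pv_bounds_pos a ha
  obtain ⟨hb1, hb2⟩ := pv_bounds_pos b hb
  rw [hda] at ha1 ha2
  rw [hdb] at hb1 hb2
  have hsapos : (0:Int) < 10 ^ (da - 1) := by positivity
  have hsbpos : (0:Int) < 10 ^ (db - 1) := by positivity
  have hsda : (10:Int) ^ da = 10 * 10 ^ (da - 1) := by rw [← pow_succ']; congr 1; omega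
  have hne : pvNextEnd a = a + 10 ^ (da - 1) := by rw [pvNextEnd, if_neg (by omega), hda]
  rw [hne]
  rw [pvLowPart, pvLowPart, hda, hdb] at hlow
  rcases lt_trichotomy da db with hlt | heq | hgt
  · -- b has more digits
    have hr0 : (0:Int) ≤ a % 10 ^ (da - 1) := Int.emod_nonneg a (by omega)
    have hrs : a % 10 ^ (da - 1) < 10 ^ (da - 1) := Int.emod_lt_of_pos a hsapos
    have hqa : a ≤ 9 * 10 ^ (da - 1) + a % 10 ^ (da - 1) := by
      have hdm := Int.mul_ediv_add_emod a (10 ^ (da - 1))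
      have hq : a / 10 ^ (da - 1) ≤ 9 := by
        by_contra hq
        rw [not_le] at hq
        have h2 : 10 * 10 ^ (da - 1) ≤ (a / 10 ^ (da - 1)) * 10 ^ (da - 1) := by nlinarith
        nlinarith [hdm, hr0]
      nlinarith
    have hmb : 10 ^ (db - 1) + b % 10 ^ (db - 1) ≤ b := by
      have hdm := Int.mul_ediv_add_emod b (10 ^ (db - 1))
      have hm : 1 ≤ b / 10 ^ (db - 1) := by
        rw [Int.le_ediv_iff_mul_le hsbpos]; omega
      nlinarith
    have hpow : (10:Int) ^ da ≤ 10 ^ (db - 1) :=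
      pow_le_pow_right₀ (by norm_num) (by omega)
    omega
  · subst heq
    have hdvd : (10:Int) ^ (da - 1) ∣ (b - a) := by
      apply Int.dvd_of_emod_eq_zero
      rw [Int.sub_emod, hlow, Int.sub_self, Int.zero_emod]
    have : (10:Int) ^ (da - 1) ≤ b - a := Int.le_of_dvd (by omega) hdvd
    omega
  · exfalso
    have hpow : (10:Int) ^ db ≤ 10 ^ (da - 1) :=
      pow_le_pow_right₀ (by norm_num) (by omega)
    omega

def pvHits (a b : Int) : Prop := ∃ j : Nat, pvNextEnd^[j] a = b

theorem pv_hits_refl (a : Int) : pvHits a a := ⟨0, rfl⟩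

theorem pv_hits_le {a b : Int} (h : pvHits a b) : a ≤ b := by
  obtain ⟨j, hj⟩ := h
  induction j generalizing a with
  | zero => simp at hj; omega
  | succ j ih =>
    rw [Function.iterate_succ_apply] at hj
    have := ih hj
    have := pv_nextEnd_gt a
    omega

theorem pv_hits_step {a b : Int} (h : pvHits a b) (hne : a ≠ b) :
    pvNextEnd a ≤ b ∧ pvHits (pvNextEnd a) b := by
  obtain ⟨j, hj⟩ := h
  cases j with
  | zero => simp at hj; omega
  | succ j =>
    rw [Function.iterate_succ_apply] at hj
    exact ⟨pv_hits_le ⟨j, hj⟩, ⟨j, hj⟩⟩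

theorem pv_hits_trans {a b c : Int} (h1 : pvHits a b) (h2 : pvHits b c) : pvHits a c := by
  obtain ⟨j, hj⟩ := h1
  obtain ⟨k, hk⟩ := h2
  exact ⟨k + j, by rw [Function.iterate_add_apply, hj, hk]⟩

theorem pv_climb (a b : Int) (ha : 1 ≤ a) (hab : a ≤ b) (hlow : pvLowPart b = pvLowPart a) :
    pvHits a b := by
  by_cases heq : a = b
  · exact heq ▸ pv_hits_refl a
  · have hlt : a < b := by omega
    have hstep := pv_nextEnd_le a b ha hlt hlow
    have hgt := pv_nextEnd_gt a
    have hlow' : pvLowPart b = pvLowPart (pvNextEnd a) := by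
      rw [pv_low_nextEnd a ha]; exact hlow
    have ih := pv_climb (pvNextEnd a) b (by omega) hstep hlow'
    exact pv_hits_trans ⟨1, rfl⟩ ih
termination_by (b - a).toNat
decreasing_by
  have := pv_nextEnd_gt a
  omega

theorem pv_reach_hits {a b : Int} (h : pvReachB a b = true) : pvHits a b := by
  rw [pvReachB] at h
  simp only [Bool.or_eq_true, Bool.and_eq_true, beq_iff_eq, decide_eq_true_eq] at h
  rcases h with h | ⟨h1, h2⟩
  · exact h ▸ pv_hits_refl a
  · have hstart : pvHits a (pvPosStart a) := by
      rw [pvPosStart]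
      split_ifs with hp
      · exact pv_hits_refl a
      · exact ⟨1, rfl⟩
    have hpos : 1 ≤ pvPosStart a := by
      rw [pvPosStart]
      split_ifs with hp
      · omega
      · exact pv_nextEnd_pos a (by omega)
    exact pv_hits_trans hstart (pv_climb _ _ hpos h1 h2)

def pvRunB (hist : List (Int × Int)) (last cur : Int) : List (List (String × Int)) :=
  let b := [("value", pvNextEnd cur), ("count", max (PySem.Dict.getD (PySem.Dict.mk hist) cur 0) 0)]
  if cur < last then b :: pvRunB hist last (pvNextEnd cur) else [b]
termination_by (last - cur).toNat
decreasing_by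
  have := pv_nextEnd_gt cur
  omega

theorem pv_loopB_eq (hist : List (Int × Int)) (last : Int) :
    ∀ (f : Nat) (cur : Int) (out : List (List (String × Int))),
    pvHits cur last → (last - cur).toNat < f →
    pvLoopB hist last f cur out = out ++ pvRunB hist last cur := by
  intro f
  induction f with
  | zero => omega
  | succ f ih =>
    intro cur out hh hf
    rw [pvLoopB, pvRunB]
    by_cases hc : cur = last
    · subst hc
      simp
    · obtain ⟨hle, hh'⟩ := pv_hits_step hh hc
      have hcl : cur < last := lt_of_le_of_ne (pv_hits_le hh) hc
      rw [if_neg hc, if_pos hcl]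
      have hgt := pv_nextEnd_gt cur
      rw [ih (pvNextEnd cur) _ hh' (by omega)]
      simp

theorem pv_seg (hist : List (Int × Int)) (last target : Int) (htl : target ≤ last) :
    ∀ (f : Nat) (rep : Int) (acc : List (List (String × Int))),
    pvHits rep target →
    (∀ c : Int, rep ≤ c → c < target → PySem.Dict.getD (PySem.Dict.mk hist) c 0 = 0) →
    (target - rep).toNat ≤ f →
    ∃ X, pvGapA target f rep acc = (target, acc ++ X) ∧
      pvRunB hist last rep = X ++ pvRunB hist last target := by
  intro f
  induction f with
  | zero =>
    intro rep acc hh _ hf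
    have hle := pv_hits_le hh
    have : rep = target := by omega
    subst this
    exact ⟨[], by rw [pvGapA]; simp, by simp⟩
  | succ f ih =>
    intro rep acc hh hz hf
    by_cases hc : target = rep
    · subst hc
      exact ⟨[], by rw [pvGapA]; simp, by simp⟩
    · obtain ⟨hle, hh'⟩ := pv_hits_step hh (fun h => hc h.symm)
      have hgt := pv_nextEnd_gt rep
      have hrt : rep < target := lt_of_le_of_ne (pv_hits_le hh) (fun h => hc h.symm)
      obtain ⟨X, hX1, hX2⟩ := ih (pvNextEnd rep) (acc ++ [[("value", pvNextEnd rep), ("count", (0:Int))]])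
        hh' (fun c h1 h2 => hz c (by omega) h2) (by omega)
      refine ⟨[("value", pvNextEnd rep), ("count", (0:Int))] :: X, ?_, ?_⟩
      · rw [pvGapA, if_neg hc]
        simp only [hX1, List.append_assoc, List.singleton_append]
      · rw [pvRunB, if_pos (by omega)]
        have hz0 : PySem.Dict.getD (PySem.Dict.mk hist) rep 0 = 0 := hz rep le_rfl hrt
        rw [hz0, hX2]
        simp


theorem pv_clamp (v : Int) : (if v < 0 then 0 else v) = max v 0 := by
  rcases le_or_gt 0 v with h | h
  · rw [if_neg (by omega), max_eq_left h]
  · rw [if_pos h, max_eq_right (by omega)]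

theorem pv_le_getLast : ∀ (l : List Int) (h : l ≠ []), l.Pairwise (· < ·) → ∀ x ∈ l, x ≤ l.getLast h := by
  intro l
  induction l with
  | nil => intro h; simp at h
  | cons a t ih =>
    intro h hp x hx
    cases t with
    | nil => simp at hx; simp [hx]
    | cons b t' =>
      rw [List.getLast_cons (by simp)]
      rcases List.mem_cons.1 hx with hx | hx
      · subst hx
        have h1 := (List.pairwise_cons.1 hp).1 _ (List.getLast_mem (l := b :: t') (by simp))
        exact le_of_lt h1
      · exact ih (by simp) hp.of_cons x hx

theorem pv_chain_hits : ∀ (ks : List Int) (k : Int),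
    List.IsChain (fun k k' => pvReachB (pvNextEnd k) k' = true) (k :: ks) →
    pvHits k ((k :: ks).getLast (by simp)) := by
  intro ks
  induction ks with
  | nil => intro k _; simp [pv_hits_refl]
  | cons k' rest ih =>
    intro k hc
    rw [List.isChain_cons_cons] at hc
    have h1 : pvHits k k' := pv_hits_trans ⟨1, rfl⟩ (pv_reach_hits hc.1)
    have h2 := ih k' hc.2
    rw [List.getLast_cons (by simp)]
    exact pv_hits_trans h1 h2

theorem pv_getD_zero (hist : List (Int × Int)) (c : Int) (hc : c ∉ hist.map Prod.fst) :
    PySem.Dict.getD (PySem.Dict.mk hist) c 0 = 0 := by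
  have hk : c ∉ (PySem.Dict.mk hist).keys := by
    simpa [PySem.Dict.keys] using hc
  rw [PySem.Dict.getD, (PySem.Dict.get?_eq_none_iff_not_mem_keys _ _).2 hk]
  rfl

theorem pv_mainA (hist : List (Int × Int)) (last : Int) :
    ∀ (ks : List Int) (kprev : Int) (acc : List (List (String × Int))) (i : Int),
    1 ≤ i →
    List.IsChain (fun k k' => pvReachB (pvNextEnd k) k' = true) (kprev :: ks) →
    (kprev :: ks).Pairwise (· < ·) →
    (∀ c : Int, kprev < c → c ∉ ks → PySem.Dict.getD (PySem.Dict.mk hist) c 0 = 0) →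
    (kprev :: ks).getLast (by simp) = last →
    pvLoopA hist ks
      (acc ++ [[("value", pvNextEnd kprev),
                ("count", if PySem.Dict.getD (PySem.Dict.mk hist) kprev 0 < 0 then 0
                          else PySem.Dict.getD (PySem.Dict.mk hist) kprev 0)]])
      i (pvNextEnd kprev)
      = acc ++ pvRunB hist last kprev := by
  intro ks
  induction ks with
  | nil =>
    intro kprev acc i hi hch hpw hz hlast
    simp only [List.getLast_singleton] at hlast
    subst hlast
    rw [pvLoopA, pvRunB, if_neg (lt_irrefl kprev)]
    rw [pv_clamp]
  | cons k' rest ih =>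
    intro kprev acc i hi hch hpw hz hlast
    have hch' := (List.isChain_cons_cons.1 hch)
    have hits : pvHits (pvNextEnd kprev) k' := pv_reach_hits hch'.1
    have hgt := pv_nextEnd_gt kprev
    have hkk : kprev < k' := by
      have := pv_hits_le hits; omega
    have hpw' : (k' :: rest).Pairwise (· < ·) := hpw.of_cons
    have hk'rest : ∀ x ∈ rest, k' < x := fun x hx => (List.pairwise_cons.1 hpw').1 x hx
    have hlast' : (k' :: rest).getLast (by simp) = last := by
      rw [← hlast]
      exact (List.getLast_cons (by simp)).symm
    have hkl : k' ≤ last := by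
      rw [← hlast']
      exact pv_le_getLast _ (by simp) hpw' k' (by simp)
    have hzgap : ∀ c : Int, pvNextEnd kprev ≤ c → c < k' →
        PySem.Dict.getD (PySem.Dict.mk hist) c 0 = 0 := by
      intro c h1 h2
      apply hz c (by omega)
      intro hmem
      rcases List.mem_cons.1 hmem with h | h
      · omega
      · have := hk'rest c h; omega
    -- decompose the gap step
    obtain ⟨X, hX1, hX2⟩ := pv_seg hist last k' hkl ((k' - pvNextEnd kprev).toNat)
      (pvNextEnd kprev) (acc ++ [[("value", pvNextEnd kprev),
        ("count", if PySem.Dict.getD (PySem.Dict.mk hist) kprev 0 < 0 then 0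
                  else PySem.Dict.getD (PySem.Dict.mk hist) kprev 0)]])
      hits hzgap le_rfl
    rw [pvLoopA]
    simp only [if_pos (by omega : i ≠ 0)]
    have hbranch :
        (if k' ≠ pvNextEnd kprev then
          pvGapA k' ((k' - pvNextEnd kprev).toNat) (pvNextEnd kprev)
            (acc ++ [[("value", pvNextEnd kprev),
              ("count", if PySem.Dict.getD (PySem.Dict.mk hist) kprev 0 < 0 then 0
                        else PySem.Dict.getD (PySem.Dict.mk hist) kprev 0)]])
         else (pvNextEnd kprev,
            acc ++ [[("value", pvNextEnd kprev),
              ("count", if PySem.Dict.getD (PySem.Dict.mk hist) kprev 0 < 0 then 0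
                        else PySem.Dict.getD (PySem.Dict.mk hist) kprev 0)]])).2
        = (acc ++ [[("value", pvNextEnd kprev),
              ("count", if PySem.Dict.getD (PySem.Dict.mk hist) kprev 0 < 0 then 0
                        else PySem.Dict.getD (PySem.Dict.mk hist) kprev 0)]]) ++ X := by
      by_cases hce : k' = pvNextEnd kprev
      · rw [if_neg (by simp [hce])]
        have hX0 : X = [] := by
          rw [← hce] at hX2
          exact List.self_eq_append_left.mp hX2
        simp [hX0]
      · rw [if_pos hce, hX1]
    rw [hbranch]
    have hrun : pvRunB hist last kprev =
        [("value", pvNextEnd kprev),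
         ("count", max (PySem.Dict.getD (PySem.Dict.mk hist) kprev 0) 0)] :: (X ++ pvRunB hist last k') := by
      rw [pvRunB, if_pos (by omega : kprev < last), hX2]
    have ihapp := ih k'
      (acc ++ [[("value", pvNextEnd kprev),
        ("count", if PySem.Dict.getD (PySem.Dict.mk hist) kprev 0 < 0 then 0
                  else PySem.Dict.getD (PySem.Dict.mk hist) kprev 0)]] ++ X)
      (i + 1) (by omega) hch'.2 hpw'
      (fun c h1 h2 => hz c (by omega) (by simp [h2]; omega))
      hlast'
    simp only [List.append_assoc] at ihapp ⊢
    rw [ihapp, hrun]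
    simp [pv_clamp]

theorem pv_final (hist : List (Int × Int)) (hpre : Pre_fix_hist_format hist) :
    fix_hist_format hist = fix_hist_format_alt hist := by
  obtain ⟨hnd, hch⟩ := hpre
  have hkeys : PySem.Dict.keys (PySem.Dict.mk hist) = hist.map Prod.fst := rfl
  rcases hL : PySem.List.sorted (hist.map Prod.fst) (fun x => x) false with _ | ⟨k, rest⟩
  · simp [fix_hist_format, fix_hist_format_alt, hkeys, hL, pvLoopA]
  · rw [hL] at hch
    have hperm : (PySem.List.sorted (hist.map Prod.fst) (fun x => x) false).Perm (hist.map Prod.fst) :=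
      PySem.List.sorted_perm _ _ _
    rw [hL] at hperm
    have hndL : (k :: rest).Nodup := hperm.nodup_iff.2 hnd
    have hle : (k :: rest).Pairwise (· ≤ ·) := by
      have := PySem.List.sorted_pairwise (hist.map Prod.fst) (fun x => x)
      rw [hL] at this
      exact this
    have hlt : (k :: rest).Pairwise (· < ·) :=
      List.sortedLT_iff_pairwise.1
        ((List.sortedLE_iff_pairwise.2 hle).sortedLT_of_nodup hndL)
    have hz : ∀ c : Int, k < c → c ∉ rest → PySem.Dict.getD (PySem.Dict.mk hist) c 0 = 0 := by
      intro c h1 h2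
      apply pv_getD_zero
      intro hmem
      have : c ∈ k :: rest := hperm.mem_iff.2 hmem
      rcases List.mem_cons.1 this with h | h
      · omega
      · exact h2 h
    have hmain := pv_mainA hist ((k :: rest).getLast (by simp)) rest k [] 1 le_rfl hch hlt hz rfl
    have hhits : pvHits k ((k :: rest).getLast (by simp)) := pv_chain_hits rest k hch
    have hfl : ((k :: rest).getLast (by simp) - k).toNat < ((k :: rest).getLast (by simp) - k).toNat + 1 := by omega
    have hB := pv_loopB_eq hist ((k :: rest).getLast (by simp))
      (((k :: rest).getLast (by simp) - k).toNat + 1) k [] hhits hfl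
    simp only [fix_hist_format, fix_hist_format_alt, hkeys, hL]
    rw [pvLoopA]
    simp only [ne_eq, not_true_eq_false, if_false]
    rw [show (0:Int) + 1 = 1 by ring]
    simp only [List.nil_append] at hmain hB ⊢
    rw [hmain, hB]

-- ===== VERDICT (by name: the statement is the Claim_ definition above) =====
theorem fix_hist_format_spec : Claim_equal_fix_hist_format := by
  intro hist _ hpre
  unfold Spec_fix_hist_format
  exact pv_final hist hpre
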